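-- pv_equiv track=rewrite | github.com/Bohdan-Zasiadvovk/bot_dobromir | classes/Tools.py | get_count_from_str
-- ===== SOURCE A (Python) =====
-- def get_count_from_str(text):
--     num_str = ''
--     found_number = False
--     for char in text:
--         if char.isdigit():
--             num_str += char
--             found_number = True
--         elif found_number:
--             # Якщо ми знайшли число і потрапили на не-цифровий символ, зупиняємо пошук
--             break
--     # Повертаємо число якщо знайдено, в іншому випадку None
--     return int(num_str) if num_str else None
-- ===== SOURCE B (Python) =====
-- def get_count_from_str(text):
--     n = len(text)
--     i = 0
--     while i < n and not text[i].isdigit():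
--         i += 1
--     j = i
--     while j < n and text[j].isdigit():
--         j += 1
--     return int(text[i:j]) if j > i else None
-- ===== Notes on version B (the rewrite author's own statement) =====
-- stated objective: alternative
-- what changed: Replaced A's flag-driven accumulator loop (building the digit string char by char with a found_number flag and break) by a two-phase index scan: skip leading non-digits, advance past the digit run, then slice text[i:j] once.
import Mathlib
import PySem

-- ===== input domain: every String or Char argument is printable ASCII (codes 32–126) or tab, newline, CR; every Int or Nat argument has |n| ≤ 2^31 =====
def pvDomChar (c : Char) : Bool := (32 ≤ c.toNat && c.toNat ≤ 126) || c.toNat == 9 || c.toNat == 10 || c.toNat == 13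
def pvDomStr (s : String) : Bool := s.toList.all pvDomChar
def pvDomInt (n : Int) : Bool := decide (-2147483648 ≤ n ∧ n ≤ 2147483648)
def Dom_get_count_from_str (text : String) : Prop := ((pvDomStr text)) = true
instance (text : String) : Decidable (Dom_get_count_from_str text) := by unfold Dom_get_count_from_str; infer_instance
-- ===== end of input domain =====

-- B replaces A's flag-driven accumulator loop by a two-phase skip/scan over indices plus one slice; same return value everywhere.

-- ===== PORT A =====
-- A's for-loop over the characters, carrying the accumulated digit string and the found_number flag;
-- returning num early models the `break`.
def pvALoop : List Char → List Char → Bool → List Char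
  | [], num, _ => num
  | c :: cs, num, found =>
    if PySem.Chars.isdigit c then pvALoop cs (num ++ [c]) true
    else if found then num
    else pvALoop cs num found

def get_count_from_str (text : String) : Option Int :=
  let num := pvALoop text.toList [] false
  -- `int(num_str) if num_str else None`; int() cannot raise here (num is ASCII digits on Dom)
  if num = [] then none else PySem.Int.ofChars? num

-- ===== PORT B =====
-- first while loop of Source B: advance i past leading non-digits (returned suffix = text[i:])
def pvBSkip : List Char → List Char
  | [] => []
  | c :: cs => if PySem.Chars.isdigit c then c :: cs else pvBSkip cs

-- second while loop of Source B: advance j while digits (returned prefix = text[i:j])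
def pvBScan : List Char → List Char
  | [] => []
  | c :: cs => if PySem.Chars.isdigit c then c :: pvBScan cs else []

def get_count_from_str_alt (text : String) : Option Int :=
  let run := pvBScan (pvBSkip text.toList)
  if run = [] then none else PySem.Int.ofChars? run

-- ===== PRECONDITION & SPEC =====
def Spec_get_count_from_str (text : String) (out : Option Int) : Prop := out = get_count_from_str_alt text
instance (text : String) (out : Option Int) : Decidable (Spec_get_count_from_str text out) := by unfold Spec_get_count_from_str; infer_instance

-- ===== CLAIM (what is proved, stated in full; the proofs are below) =====
def Claim_equal_get_count_from_str : Prop := ∀ (text : String), Dom_get_count_from_str text → Spec_get_count_from_str text (get_count_from_str text)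

-- ===== LEMMAS AND PROOFS =====

-- once the flag is set, A's loop appends exactly the leading digit run
theorem pvALoop_true (cs : List Char) : ∀ num, pvALoop cs num true = num ++ pvBScan cs := by
  induction cs with
  | nil => intro num; simp [pvALoop, pvBScan]
  | cons c cs ih =>
    intro num
    by_cases h : PySem.Chars.isdigit c = true
    · simp [pvALoop, pvBScan, h, ih]
    · simp [pvALoop, pvBScan, h]

-- before the flag is set, A's loop is B's skip phase followed by B's scan phase
theorem pvALoop_false (cs : List Char) : pvALoop cs [] false = pvBScan (pvBSkip cs) := by
  induction cs with
  | nil => simp [pvALoop, pvBSkip, pvBScan]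
  | cons c cs ih =>
    by_cases h : PySem.Chars.isdigit c = true
    · simp [pvALoop, pvBSkip, pvBScan, h, pvALoop_true]
    · simp [pvALoop, pvBSkip, h, ih]

-- ===== VERDICT (by name: the statement is the Claim_ definition above) =====
theorem get_count_from_str_spec : Claim_equal_get_count_from_str := by
  intro text _
  unfold Spec_get_count_from_str get_count_from_str get_count_from_str_alt
  rw [pvALoop_false]
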